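-- pv_equiv track=rewrite | github.com/Krapoviche/happy-cube-solver | happy_cube.py | getEdges
-- ===== SOURCE A (Python) =====
-- def getArrete(piece, numArrete):
--     # Special treatment for the last edge because of it's last bit being actually the first of the piece
--     if numArrete == 4 :
--         # Making every bit that isn't the 4 lasts
--         mask = (1 << 4) - 1
--
--         # Get the first bit
--         firstBit = piece >> 15
--
--         # Compute the edge
--         res = piece & mask
--         return (res << 1) + firstBit
--
--     # For other edges, we create a mask that will keep every bits on the right from the first to the one starting the edge the user is asking for
--     masque = (1 << (4 + (4* (4-numArrete)))) - 1
--
--     # Then we apply this mask and shift the result to the right until the end of the edge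
--     return (piece & masque) >> (4* (4-numArrete) - 1 )
--
-- def flipPiece(edges):
--     flippedEdges = []
--
--     # For each edge
--     for edge in edges:
--         # Start to build the new one
--         reversedArrete = ["0","b"]
--
--         # Reverse the edge
--         for i in range(len(bin(edge)) -1,1,-1):
--             reversedArrete.append(bin(edge)[i])
--
--         # Complete the potentially lost zeros
--         while len(reversedArrete) < 5 + 2 :
--             reversedArrete.append("0")
--
--         # Translation to an int and append it to flippedEdges
--         flippedEdges.append(int("".join(reversedArrete)[2:],2))
--
--     # Switch top and bottom edges (horizontall flip)
--     flippedEdges[0],flippedEdges[2] = flippedEdges[2],flippedEdges[0]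
--
--     return flippedEdges
--
-- def getEdges(piece):
--     arretes = []
--
--     # Adding edges before flipping
--     for i in range(1,5):
--         arretes.append(getArrete(piece,i))
--
--     flippedPiece = flipPiece(arretes)
--
--     # Adding edges after flipping
--     for i in flippedPiece:
--         arretes.append(i)
--
--     return arretes
-- ===== SOURCE B (Python) =====
-- def getEdges(piece):
--     # Extract the four 5-bit edges arithmetically (the fourth wraps around to the piece's first bit),
--     # then bit-reverse each with an integer loop; flipped top/bottom edges are swapped in the output.
--     e0 = piece // 2048 % 32
--     e1 = piece // 128 % 32
--     e2 = piece // 8 % 32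
--     e3 = piece % 16 * 2 + piece // 32768
--
--     def rev(v):
--         n = max(v.bit_length(), 5)
--         r = 0
--         for _ in range(n):
--             r = 2 * r + v % 2
--             v //= 2
--         return r
--
--     return [e0, e1, e2, e3, rev(e2), rev(e1), rev(e0), rev(e3)]
-- ===== Notes on version B (the rewrite author's own statement) =====
-- stated objective: simpler
-- what changed: Replaces A's per-edge mask construction and string-based bin()/reverse/pad/int(...,2) bit reversal with direct arithmetic extraction of each 5-bit edge and an integer bit-reversal loop, with no intermediate list mutation or swap.
import Mathlib
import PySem

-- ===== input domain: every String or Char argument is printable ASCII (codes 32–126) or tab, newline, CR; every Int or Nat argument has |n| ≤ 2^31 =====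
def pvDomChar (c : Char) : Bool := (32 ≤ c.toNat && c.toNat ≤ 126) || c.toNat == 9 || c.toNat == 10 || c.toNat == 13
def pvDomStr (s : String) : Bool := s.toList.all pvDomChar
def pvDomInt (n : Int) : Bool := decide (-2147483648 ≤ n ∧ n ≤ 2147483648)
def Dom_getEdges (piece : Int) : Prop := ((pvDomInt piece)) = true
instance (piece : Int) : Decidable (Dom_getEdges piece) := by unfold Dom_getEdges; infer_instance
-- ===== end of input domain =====

-- B replaces A's mask-table edge extraction and string-based bin() bit reversal by direct
-- arithmetic extraction and an integer bit-reversal loop (objective: simpler).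

-- ===== PORT A =====

-- Port of getArrete. The shift/mask exponents are nonnegative for numArrete ∈ {1,2,3,4},
-- the only calls the module makes; `.toNat` is exact there (Python raises on a negative shift).
def getArrete (piece : Int) (numArrete : Int) : Int :=
  if numArrete = 4 then
    let mask : Int := (1 <<< (4:Nat)) - 1
    let firstBit := piece >>> (15:Nat)
    let res := PySem.Int.band piece mask
    (res <<< (1:Nat)) + firstBit
  else
    let masque : Int := (1 <<< (4 + 4 * (4 - numArrete)).toNat) - 1
    (PySem.Int.band piece masque) >>> ((4 * (4 - numArrete) - 1).toNat)

-- Hand port of int(s, 2), exact on the nonempty, whitespace/sign/underscore-free strings this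
-- program builds: a string of '0'/'1' digits gives its value; any other character (the 'b'
-- reached when an edge is negative) is a ValueError, i.e. none.
def parseBinAux (acc : Int) : List Char → Option Int
  | [] => some acc
  | c :: r =>
    if c = '0' then parseBinAux (2 * acc) r
    else if c = '1' then parseBinAux (2 * acc + 1) r
    else none

def parseBin? (s : List Char) : Option Int :=
  if s = [] then none else parseBinAux 0 s

-- Body of flipPiece's for-loop for one edge.
def flipOne (edge : Int) : Option Int :=
  let b := PySem.Int.toBinChars0b edge              -- bin(edge)
  -- "for i in range(len(bin(edge))-1, 1, -1): append bin(edge)[i]" appends exactly the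
  -- characters of bin(edge) after the first two, in reverse order:
  let reversedArrete := ['0', 'b'] ++ (b.drop 2).reverse
  -- "while len(reversedArrete) < 5 + 2: append '0'"
  let padded := reversedArrete ++ List.replicate (7 - reversedArrete.length) '0'
  parseBin? (padded.drop 2)                         -- int("".join(...)[2:], 2)

def flipPiece (edges : List Int) : List Int :=
  -- the ValueError case (negative edge) is excluded by Pre_getEdges; getD's default is unreachable there
  let flippedEdges := edges.map (fun e => (flipOne e).getD 0)
  -- flippedEdges[0], flippedEdges[2] = flippedEdges[2], flippedEdges[0]  (lists of length 4 here)
  let a0 := flippedEdges.getD 0 0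
  let a2 := flippedEdges.getD 2 0
  (flippedEdges.set 0 a2).set 2 a0

def getEdges (piece : Int) : List Int :=
  let arretes := (PySem.List.pyRange 1 5 1).map (fun i => getArrete piece i)
  arretes ++ flipPiece arretes

-- ===== PORT B =====

-- "for _ in range(n): r = 2*r + v % 2; v //= 2"
def revLoop : Nat → Int × Int → Int × Int
  | 0, s => s
  | k + 1, (r, v) => revLoop k (2 * r + PySem.Int.mod v 2, PySem.Int.floordiv v 2)

def rev5 (v : Int) : Int :=
  (revLoop (max (PySem.Int.bitLength v) 5) (0, v)).1

def getEdges_alt (piece : Int) : List Int :=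
  let e0 := PySem.Int.mod (PySem.Int.floordiv piece 2048) 32
  let e1 := PySem.Int.mod (PySem.Int.floordiv piece 128) 32
  let e2 := PySem.Int.mod (PySem.Int.floordiv piece 8) 32
  let e3 := PySem.Int.mod piece 16 * 2 + PySem.Int.floordiv piece 32768
  [e0, e1, e2, e3, rev5 e2, rev5 e1, rev5 e0, rev5 e3]

-- ===== PRECONDITION & SPEC =====

-- A raises ValueError exactly when the wrap-around fourth edge 2*(piece%16) + piece//32768 is
-- negative (only possible for negative piece): bin() of that negative edge makes the reversed
-- string contain 'b', which int(·, 2) rejects. Pre_ excludes exactly those inputs.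
def Pre_getEdges (piece : Int) : Prop :=
  0 ≤ PySem.Int.mod piece 16 * 2 + PySem.Int.floordiv piece 32768
instance (piece : Int) : Decidable (Pre_getEdges piece) := by unfold Pre_getEdges; infer_instance

def pvWitness_getEdges : Int := 12345

def Spec_getEdges (piece : Int) (out : List Int) : Prop := out = getEdges_alt piece
instance (piece : Int) (out : List Int) : Decidable (Spec_getEdges piece out) := by unfold Spec_getEdges; infer_instance

-- ===== CLAIM (what is proved, stated in full; the proofs are below) =====
def Claim_equal_getEdges : Prop := ∀ (piece : Int), Dom_getEdges piece → Pre_getEdges piece → Spec_getEdges piece (getEdges piece)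

-- ===== LEMMAS AND PROOFS =====

-- Python's  a >> k  on Int is (floor) division by 2^k (ediv and floor agree: the divisor is positive).
theorem shiftR_eq (a : Int) (k : Nat) : a >>> k = a / (2 ^ k : Int) := by
  have hp : ((2:Int) ^ k) = ((2 ^ k : Nat) : Int) := by push_cast; ring
  cases a with
  | ofNat n =>
    show Int.ofNat (n >>> k) = _
    rw [Nat.shiftRight_eq_div_pow, hp]
    simp [Int.ofNat_eq_natCast]
  | negSucc n =>
    show Int.negSucc (n >>> k) = _
    rw [Nat.shiftRight_eq_div_pow,
        Int.negSucc_ediv n (b := (2^k : Int)) (by positivity)]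
    rw [hp]
    simp [Int.negSucc_eq, Int.ediv]


-- Python's  a & (2^m - 1)  is  a mod 2^m (the mask is all-ones below bit m).
theorem band_mask (a : Int) (m : Nat) : PySem.Int.band a (2 ^ m - 1) = a % ((2 ^ m : Nat) : Int) := by
  have h1 : ((2:Int) ^ m - 1) = ((2 ^ m - 1 : Nat) : Int) := by
    have : 1 ≤ 2 ^ m := Nat.one_le_two_pow
    push_cast [this]; ring
  rcases a with n | n
  · show PySem.Int.band (Int.ofNat n) _ = _
    rw [h1, Int.ofNat_eq_natCast, PySem.Int.band_natCast,
        Nat.and_two_pow_sub_one_eq_mod]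
    simp
  · rw [h1]
    show PySem.Int.band (Int.negSucc n) _ = _
    rw [Int.negSucc_eq]
    unfold PySem.Int.band
    have h3 : (0:Int) ≤ ((2^m - 1 : Nat) : Int) := by positivity
    rw [if_neg (by omega), if_pos h3]
    have h4 : (- -((n:Int) + 1) - 1).toNat = n := by omega
    have h5 : ((2^m-1:Nat):Int).toNat = 2^m - 1 := by omega
    rw [h4, h5, Nat.and_comm, Nat.and_two_pow_sub_one_eq_mod]
    have hlt : n % 2^m < 2^m := Nat.mod_lt _ (Nat.pos_of_ne_zero (by positivity))
    have hdm : ((2^m : Nat) : Int) * ((n / 2^m : Nat) : Int) + ((n % 2^m : Nat) : Int) = (n : Int) := by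
      exact_mod_cast congrArg (Nat.cast : Nat → Int) (Nat.div_add_mod n (2^m))
    have hc : ((2^m - 1 - n % 2^m : Nat) : Int) = ((2^m : Nat) : Int) - 1 - ((n % 2^m : Nat) : Int) := by
      omega
    have hrep : -((n:Int)+1)
        = (((2^m : Nat):Int) - 1 - ((n % 2^m : Nat):Int)) + ((2^m : Nat) : Int) * (-((n / 2^m : Nat) : Int) - 1) := by
      linear_combination hdm
    rw [hc, hrep, Int.add_mul_emod_self_left]
    rw [Int.emod_eq_of_lt (by omega) (by omega)]

def binDigits (n : Nat) : List Char :=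
  if _h : n < 2 then [Nat.digitChar n]
  else binDigits (n / 2) ++ [Nat.digitChar (n % 2)]
  decreasing_by omega

theorem toDigitsCore_eq : ∀ (f n : Nat) (l : List Char), n < f →
    Nat.toDigitsCore 2 f n l = binDigits n ++ l := by
  intro f
  induction f with
  | zero => intro n l h; omega
  | succ f ih =>
    intro n l h
    simp only [Nat.toDigitsCore]
    by_cases h2 : n / 2 = 0
    · simp only [if_pos h2]
      rw [binDigits, dif_pos (by omega)]
      have h3 : n % 2 = n := by omega
      rw [h3]
      rfl
    · simp only [if_neg h2]
      rw [ih (n / 2) ((n % 2).digitChar :: l) (by omega)]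
      conv_rhs => rw [binDigits]
      rw [dif_neg (by omega)]
      simp

theorem toDigits_eq (n : Nat) : Nat.toDigits 2 n = binDigits n := by
  show Nat.toDigitsCore 2 (n+1) n [] = _
  rw [toDigitsCore_eq _ _ _ (by omega)]
  simp

def revbits : Nat → Nat → Nat
  | 0, _ => 0
  | k + 1, n => n % 2 * 2 ^ k + revbits k (n / 2)

theorem revbits_zero (k : Nat) : revbits k 0 = 0 := by
  induction k with
  | zero => rfl
  | succ k ih => simp [revbits, ih]

theorem revbits_pad : ∀ (L E n : Nat), n < 2 ^ L → revbits (L + E) n = revbits L n * 2 ^ E := by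
  intro L
  induction L with
  | zero =>
    intro E n h
    have : n = 0 := by omega
    subst this
    simp [revbits_zero, revbits]
  | succ L ih =>
    intro E n h
    have hsucc : L + 1 + E = (L + E) + 1 := by omega
    rw [hsucc]
    show n % 2 * 2 ^ (L + E) + revbits (L + E) (n / 2) = revbits (L + 1) n * 2 ^ E
    have hdiv : n / 2 < 2 ^ L := by
      have : 2 ^ (L + 1) = 2 * 2 ^ L := by ring
      omega
    rw [ih E (n / 2) hdiv]
    show _ = (n % 2 * 2 ^ L + revbits L (n / 2)) * 2 ^ E
    rw [pow_add]
    ring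

theorem binDigits_ne_nil (n : Nat) : binDigits n ≠ [] := by
  rw [binDigits]
  split
  · simp
  · simp

theorem binDigits_lt (n : Nat) : n < 2 ^ (binDigits n).length := by
  induction n using binDigits.induct with
  | case1 n h => rw [binDigits, dif_pos h]; simpa using h
  | case2 n h ih =>
    rw [binDigits, dif_neg h]
    simp only [List.length_append, List.length_cons, List.length_nil]
    have : 2 ^ ((binDigits (n / 2)).length + (0 + 1)) = 2 * 2 ^ (binDigits (n / 2)).length := by ring
    omega

theorem binDigits_length (n : Nat) (h : 0 < n) :
    (binDigits n).length = PySem.Int.bitLength (n : Int) := by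
  induction n using binDigits.induct with
  | case1 n h2 =>
    have : n = 1 := by omega
    subst this
    rw [binDigits]
    norm_num
    decide
  | case2 n h2 ih =>
    rw [binDigits, dif_neg h2]
    rw [PySem.Int.bitLength_natCast (by omega)]
    simp only [List.length_append, List.length_cons, List.length_nil]
    rw [ih (by omega)]

theorem parseBinAux_append (l1 l2 : List Char) : ∀ (acc r1 : Int),
    parseBinAux acc l1 = some r1 → parseBinAux acc (l1 ++ l2) = parseBinAux r1 l2 := by
  induction l1 with
  | nil =>
    intro acc r1 h
    obtain rfl : acc = r1 := by simpa [parseBinAux] using h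
    rfl
  | cons c t ih =>
    intro acc r1 h
    simp only [parseBinAux, List.cons_append] at h ⊢
    split_ifs at h ⊢ with h1 h2
    · exact ih _ _ h
    · exact ih _ _ h

theorem parseBinAux_replicate : ∀ (k : Nat) (acc : Int),
    parseBinAux acc (List.replicate k '0') = some (acc * 2 ^ k) := by
  intro k
  induction k with
  | zero => intro acc; simp [parseBinAux]
  | succ k ih =>
    intro acc
    rw [List.replicate_succ]
    show parseBinAux acc ('0' :: List.replicate k '0') = _
    simp only [parseBinAux, reduceIte]
    rw [ih]
    congr 1
    ring

theorem parseBinAux_rev (n : Nat) : ∀ (acc : Int),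
    parseBinAux acc (binDigits n).reverse
      = some (acc * 2 ^ (binDigits n).length + (revbits (binDigits n).length n : Int)) := by
  induction n using binDigits.induct with
  | case1 n h =>
    intro acc
    rw [binDigits, dif_pos h]
    interval_cases n
    · simp [parseBinAux, revbits, Nat.digitChar]
      ring
    · simp [parseBinAux, revbits, Nat.digitChar]
      ring
  | case2 n h ih =>
    intro acc
    conv_lhs => rw [binDigits, dif_neg h]
    conv_rhs => rw [binDigits, dif_neg h]
    rw [List.reverse_append]
    simp only [List.reverse_cons, List.reverse_nil, List.nil_append, List.singleton_append]
    have hd : (n % 2).digitChar = if n % 2 = 1 then '1' else '0' := by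
      rcases Nat.mod_two_eq_zero_or_one n with h2 | h2 <;> simp [h2, Nat.digitChar]
    show parseBinAux acc ((n % 2).digitChar :: (binDigits (n / 2)).reverse) = _
    simp only [List.length_append, List.length_cons, List.length_nil]
    rcases Nat.mod_two_eq_zero_or_one n with h2 | h2
    · rw [hd, if_neg (by omega)]
      simp only [parseBinAux, reduceIte]
      rw [ih]
      show _ = some (acc * 2 ^ ((binDigits (n/2)).length + (0+1)) + (revbits ((binDigits (n/2)).length + (0+1)) n : Int))
      congr 1
      show (2 * acc) * 2 ^ (binDigits (n/2)).length + (revbits (binDigits (n/2)).length (n/2) : Int) = _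
      rw [show (binDigits (n/2)).length + (0+1) = (binDigits (n/2)).length + 1 from rfl]
      show _ = acc * 2 ^ ((binDigits (n/2)).length + 1) + ((n % 2 * 2 ^ (binDigits (n/2)).length + revbits (binDigits (n/2)).length (n / 2) : Nat) : Int)
      rw [h2]
      push_cast
      ring
    · rw [hd, if_pos h2]
      simp only [parseBinAux]
      rw [if_neg (show ¬ ('1':Char) = '0' by decide), if_pos trivial]
      rw [ih]
      congr 1
      show (2 * acc + 1) * 2 ^ (binDigits (n/2)).length + (revbits (binDigits (n/2)).length (n/2) : Int) = _
      show _ = acc * 2 ^ ((binDigits (n/2)).length + (0+1)) + ((n % 2 * 2 ^ (binDigits (n/2)).length + revbits (binDigits (n/2)).length (n / 2) : Nat) : Int)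
      rw [h2]
      push_cast
      ring

theorem revLoop_fst : ∀ (k : Nat) (r v : Int), 0 ≤ v →
    (revLoop k (r, v)).1 = r * 2 ^ k + (revbits k v.toNat : Int) := by
  intro k
  induction k with
  | zero => intro r v hv; simp [revLoop, revbits]
  | succ k ih =>
    intro r v hv
    show (revLoop k (2 * r + PySem.Int.mod v 2, PySem.Int.floordiv v 2)).1 = _
    have hvn : v = ((v.toNat : Nat) : Int) := by omega
    have hm : PySem.Int.mod v 2 = ((v.toNat % 2 : Nat) : Int) := by
      rw [hvn]; exact_mod_cast PySem.Int.mod_natCast v.toNat 2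
    have hf : PySem.Int.floordiv v 2 = ((v.toNat / 2 : Nat) : Int) := by
      rw [hvn]; exact_mod_cast PySem.Int.floordiv_natCast v.toNat 2
    rw [hm, hf, ih _ _ (by positivity)]
    show _ = r * 2 ^ (k + 1) + ((v.toNat % 2 * 2 ^ k + revbits k (v.toNat / 2) : Nat) : Int)
    rw [Int.toNat_natCast]
    push_cast
    ring

theorem flip_eq_rev5 (v : Int) (hv : 0 ≤ v) : (flipOne v).getD 0 = rev5 v := by
  rcases Nat.eq_zero_or_pos v.toNat with h0 | hpos
  · have : v = 0 := by omega
    subst this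
    decide
  · unfold flipOne
    have hb : PySem.Int.toBinChars0b v = '0' :: 'b' :: binDigits v.toNat := by
      unfold PySem.Int.toBinChars0b
      rw [if_neg (by omega), ← toDigits_eq]
    rw [hb]
    simp only [List.drop, List.cons_append, List.nil_append, List.length_cons,
      List.length_reverse]
    set n := v.toNat with hn
    set L := (binDigits n).length with hL
    rw [show 7 - (L + 1 + 1) = 5 - L from by omega]
    have hne : (binDigits n).reverse ++ List.replicate (5 - L) '0' ≠ [] := by
      simp [binDigits_ne_nil n]
    rw [parseBin?, if_neg hne,
        parseBinAux_append _ _ 0 _ (parseBinAux_rev n 0),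
        parseBinAux_replicate]
    rw [rev5, revLoop_fst _ _ _ hv]
    have hbl : PySem.Int.bitLength v = L := by
      rw [show v = ((n : Nat) : Int) from by omega, hL]
      exact (binDigits_length n hpos).symm
    rw [hbl]
    simp only [Option.getD_some, zero_mul, zero_add, ← hL]
    rcases le_or_gt L 5 with h5 | h5
    · rw [show max L 5 = L + (5 - L) from by omega,
          revbits_pad L (5 - L) n (by rw [hL]; exact binDigits_lt n)]
      push_cast
      ring
    · rw [show max L 5 = L from by omega, show 5 - L = 0 from by omega]
      norm_num
      rw [← hn]

-- ===== VERDICT (by name: the statement is the Claim_ definition above) =====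
theorem getEdges_spec : Claim_equal_getEdges := by
  intro piece _hdom hpre
  unfold Spec_getEdges getEdges getEdges_alt
  have hmod32 : ∀ a : Int, PySem.Int.mod a 32 = a % 32 := fun a =>
    PySem.Int.mod_eq_emod_of_pos (by norm_num)
  have e1 : getArrete piece 1 = PySem.Int.mod (PySem.Int.floordiv piece 2048) 32 := by
    have h : getArrete piece 1 = (PySem.Int.band piece 65535) >>> (11:Nat) := by
      norm_num [getArrete]
      simp only [Int.reduceToNat]
      rw [show ((1:Int) <<< (16:Nat) - 1) = 65535 from by decide]
    rw [h, show (65535:Int) = 2 ^ 16 - 1 from by norm_num, band_mask piece 16, shiftR_eq,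
        hmod32, PySem.Int.floordiv_eq_ediv_of_pos (by norm_num)]
    norm_num
    omega
  have e2 : getArrete piece 2 = PySem.Int.mod (PySem.Int.floordiv piece 128) 32 := by
    have h : getArrete piece 2 = (PySem.Int.band piece 4095) >>> (7:Nat) := by
      norm_num [getArrete]
      simp only [Int.reduceToNat]
      rw [show ((1:Int) <<< (12:Nat) - 1) = 4095 from by decide]
    rw [h, show (4095:Int) = 2 ^ 12 - 1 from by norm_num, band_mask piece 12, shiftR_eq,
        hmod32, PySem.Int.floordiv_eq_ediv_of_pos (by norm_num)]
    norm_num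
    omega
  have e3 : getArrete piece 3 = PySem.Int.mod (PySem.Int.floordiv piece 8) 32 := by
    have h : getArrete piece 3 = (PySem.Int.band piece 255) >>> (3:Nat) := by
      norm_num [getArrete]
      simp only [Int.reduceToNat]
      rw [show ((1:Int) <<< (8:Nat) - 1) = 255 from by decide]
    rw [h, show (255:Int) = 2 ^ 8 - 1 from by norm_num, band_mask piece 8, shiftR_eq,
        hmod32, PySem.Int.floordiv_eq_ediv_of_pos (by norm_num)]
    norm_num
    omega
  have e4 : getArrete piece 4 = PySem.Int.mod piece 16 * 2 + PySem.Int.floordiv piece 32768 := by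
    have h : getArrete piece 4 = (PySem.Int.band piece 15) <<< (1:Nat) + piece >>> (15:Nat) := by
      norm_num [getArrete]
      rw [show ((1:Int) <<< (4:Nat) - 1) = 15 from by decide]
    rw [h, show (15:Int) = 2 ^ 4 - 1 from by norm_num, band_mask piece 4, Int.shiftLeft_eq,
        shiftR_eq, PySem.Int.mod_eq_emod_of_pos (by norm_num),
        PySem.Int.floordiv_eq_ediv_of_pos (by norm_num)]
    norm_num
  have hn1 : 0 ≤ PySem.Int.mod (PySem.Int.floordiv piece 2048) 32 := by rw [hmod32]; omega
  have hn2 : 0 ≤ PySem.Int.mod (PySem.Int.floordiv piece 128) 32 := by rw [hmod32]; omega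
  have hn3 : 0 ≤ PySem.Int.mod (PySem.Int.floordiv piece 8) 32 := by rw [hmod32]; omega
  have hn4 : 0 ≤ PySem.Int.mod piece 16 * 2 + PySem.Int.floordiv piece 32768 := hpre
  rw [show PySem.List.pyRange 1 5 1 = [1, 2, 3, 4] from by decide]
  simp only [List.map]
  unfold flipPiece
  simp only [List.map, List.getD_cons_zero, List.getD_cons_succ, List.set]
  rw [e1, e2, e3, e4,
      flip_eq_rev5 _ hn1, flip_eq_rev5 _ hn2, flip_eq_rev5 _ hn3, flip_eq_rev5 _ hn4]
  rfl
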